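-- pv_equiv track=rewrite | github.com/ariuk44/retake_exam_prep | day_12.py | isHollow
-- ===== SOURCE A (Python) =====
-- def isHollow(arr):
--     n = len(arr)
--     i = 0
--     left = 0
--     while i < n and arr[i] != 0:
--         left += 1
--         i += 1
--     zero = 0
--     while i < n and arr[i] == 0:
--         zero += 1
--         i += 1
--     right = 0
--     while i < n:
--         if arr[i] == 0:
--             return 0
--         right += 1
--         i += 1
--     if zero >= 3 and left == right:
--         return 1
--     return 0
-- ===== SOURCE B (Python) =====
-- def isHollow(arr):
--     zs = [i for i, x in enumerate(arr) if x == 0]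
--     if not zs:
--         return 0
--     if len(zs) >= 3 and zs[-1] - zs[0] + 1 == len(zs) and zs[0] == len(arr) - 1 - zs[-1]:
--         return 1
--     return 0
-- ===== Notes on version B (the rewrite author's own statement) =====
-- stated objective: idiomatic
-- what changed: B collects the zero indices in one comprehension and decides hollowness arithmetically (exactly one contiguous zero block of length >= 3, centred: first zero index equals distance of last zero from the end), instead of A's three sequential index-walking while-loops with an early return.
import Mathlib
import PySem

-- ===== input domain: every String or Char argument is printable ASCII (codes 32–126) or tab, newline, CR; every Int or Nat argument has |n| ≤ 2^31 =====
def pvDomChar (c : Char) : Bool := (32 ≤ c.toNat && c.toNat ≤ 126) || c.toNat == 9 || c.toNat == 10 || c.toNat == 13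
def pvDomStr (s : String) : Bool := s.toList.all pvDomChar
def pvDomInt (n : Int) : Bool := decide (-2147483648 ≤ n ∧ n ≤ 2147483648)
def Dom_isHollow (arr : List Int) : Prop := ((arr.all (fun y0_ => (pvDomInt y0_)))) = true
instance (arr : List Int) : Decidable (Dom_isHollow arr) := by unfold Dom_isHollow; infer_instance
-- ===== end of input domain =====

-- B replaces A's three index-walking while-loops by one comprehension collecting the
-- zero indices plus an arithmetic test on them (idiomatic; same O(n) cost, return value only).

-- ===== PORT A =====
-- first while loop: advance over the leading non-zero run, counting it
def loopA1 : List Int → Int → Int × List Int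
  | [], left => (left, [])
  | x :: xs, left => if x ≠ 0 then loopA1 xs (left + 1) else (left, x :: xs)

-- second while loop: advance over the zero run, counting it
def loopA2 : List Int → Int → Int × List Int
  | [], zero => (zero, [])
  | x :: xs, zero => if x = 0 then loopA2 xs (zero + 1) else (zero, x :: xs)

-- third while loop: count the rest; an inner zero means 'return 0' (none)
def loopA3 : List Int → Int → Option Int
  | [], right => some right
  | x :: xs, right => if x = 0 then none else loopA3 xs (right + 1)

def isHollow (arr : List Int) : Int :=
  let p1 := loopA1 arr 0
  let p2 := loopA2 p1.2 0
  match loopA3 p2.2 0 with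
  | none => 0
  | some right => if 3 ≤ p2.1 ∧ p1.1 = right then 1 else 0

-- ===== PORT B =====
def isHollow_alt (arr : List Int) : Int :=
  let zs := ((PySem.List.enumerate arr 0).filter (fun p => p.2 == 0)).map (fun p => p.1)
  match zs.head?, zs.getLast? with
  | some a, some b =>
      if (3 : Int) ≤ (zs.length : Int) ∧ b - a + 1 = (zs.length : Int) ∧ a = (arr.length : Int) - 1 - b
      then 1 else 0
  | _, _ => 0

-- ===== PRECONDITION & SPEC =====
def Spec_isHollow (arr : List Int) (out : Int) : Prop := out = isHollow_alt arr
instance (arr : List Int) (out : Int) : Decidable (Spec_isHollow arr out) := by unfold Spec_isHollow; infer_instance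

-- ===== CLAIM (what is proved, stated in full; the proofs are below) =====
def Claim_equal_isHollow : Prop := ∀ (arr : List Int), Dom_isHollow arr → Spec_isHollow arr (isHollow arr)

-- ===== LEMMAS AND PROOFS =====

-- zero-index list of xs enumerated from start s (what B's comprehension computes)
def zsFrom (xs : List Int) (s : Int) : List Int :=
  ((PySem.List.enumerate xs s).filter (fun p => p.2 == 0)).map (fun p => p.1)

lemma zsFrom_nil (s : Int) : zsFrom [] s = [] := by
  simp [zsFrom, PySem.List.enumerate_nil]

lemma zsFrom_cons (x : Int) (xs : List Int) (s : Int) :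
    zsFrom (x :: xs) s = (if x = 0 then [s] else []) ++ zsFrom xs (s + 1) := by
  simp [zsFrom, PySem.List.enumerate_cons]
  split_ifs with h <;> simp [List.filter_cons, h]

lemma zsFrom_append (xs ys : List Int) (s : Int) :
    zsFrom (xs ++ ys) s = zsFrom xs s ++ zsFrom ys (s + xs.length) := by
  simp [zsFrom, PySem.List.enumerate_append, List.filter_append]

lemma zsFrom_all_ne (xs : List Int) (s : Int) (h : ∀ x ∈ xs, x ≠ 0) : zsFrom xs s = [] := by
  induction xs generalizing s with
  | nil => simp [zsFrom_nil]
  | cons x xs ih =>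
    rw [zsFrom_cons]
    have hx : x ≠ 0 := h x (by simp)
    simp [hx, ih (s + 1) (fun y hy => h y (by simp [hy]))]

lemma zsFrom_all_zero (xs : List Int) (s : Int) (h : ∀ x ∈ xs, x = 0) :
    zsFrom xs s = (List.range xs.length).map (fun k : Nat => s + (k : Int)) := by
  induction xs generalizing s with
  | nil => simp [zsFrom_nil]
  | cons x xs ih =>
    rw [zsFrom_cons, List.length_cons, List.range_succ_eq_map]
    have hx : x = 0 := h x (by simp)
    simp [hx, ih (s + 1) (fun y hy => h y (by simp [hy]))]
    intro k _
    omega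

lemma zsFrom_mem_lb (xs : List Int) (s : Int) : ∀ m ∈ zsFrom xs s, s ≤ m := by
  intro m hm
  simp only [zsFrom, List.mem_map, List.mem_filter] at hm
  obtain ⟨p, ⟨hp, _⟩, rfl⟩ := hm
  rw [PySem.List.mem_enumerate_iff] at hp
  obtain ⟨k, hk, rfl⟩ := hp
  simp only []
  omega

lemma zsFrom_pairwise (xs : List Int) (s : Int) : (zsFrom xs s).Pairwise (· < ·) := by
  have h := PySem.List.pairwise_lt_enumerate (xs := xs) (s := s)
  have h2 := h.sublist (List.filter_sublist (l := PySem.List.enumerate xs s)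
    (p := fun p => p.2 == 0))
  exact (List.pairwise_map).2 h2

lemma zsFrom_ne_nil (xs : List Int) (s : Int) (h : ∃ x ∈ xs, x = 0) : zsFrom xs s ≠ [] := by
  induction xs generalizing s with
  | nil => simp at h
  | cons y ys ih =>
    rw [zsFrom_cons]
    by_cases hy : y = 0
    · simp [hy]
    · obtain ⟨x, hx, hx0⟩ := h
      rcases List.mem_cons.1 hx with rfl | hmem
      · exact absurd hx0 hy
      · simpa [hy] using ih (s + 1) ⟨x, hmem, hx0⟩

-- chain bound: a strictly increasing Int list starting at x reaches at least x + len - 1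
lemma chain_head_len (t : List Int) : ∀ (x : Int), (x :: t).Pairwise (· < ·) →
    x + (x :: t).length ≤ (x :: t).getLast (by simp) + 1 := by
  induction t with
  | nil => intro x _; simp
  | cons y t ih =>
    intro x hp
    have hxy : x < y := (List.pairwise_cons.1 hp).1 y (by simp)
    have hpt : (y :: t).Pairwise (· < ·) := (List.pairwise_cons.1 hp).2
    have := ih y hpt
    rw [List.getLast_cons (by simp)]
    simp only [List.length_cons] at *
    omega

-- loop characterisations of A
lemma loopA1_eq (xs : List Int) : ∀ acc : Int, loopA1 xs acc =
    (acc + ((xs.takeWhile (fun x => !(x == 0))).length : Int),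
     xs.dropWhile (fun x => !(x == 0))) := by
  induction xs with
  | nil => intro acc; simp [loopA1]
  | cons x xs ih =>
    intro acc
    by_cases h : x = 0 <;>
      simp [loopA1, h, List.takeWhile_cons, List.dropWhile_cons, ih] <;> ring

lemma loopA2_eq (xs : List Int) : ∀ acc : Int, loopA2 xs acc =
    (acc + ((xs.takeWhile (fun x => x == 0)).length : Int),
     xs.dropWhile (fun x => x == 0)) := by
  induction xs with
  | nil => intro acc; simp [loopA2]
  | cons x xs ih =>
    intro acc
    by_cases h : x = 0 <;>
      simp [loopA2, h, List.takeWhile_cons, List.dropWhile_cons, ih] <;> ring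

lemma loopA3_eq (xs : List Int) : ∀ acc : Int, loopA3 xs acc =
    if xs.all (fun x => !(x == 0)) then some (acc + (xs.length : Int)) else none := by
  induction xs with
  | nil => intro acc; simp [loopA3]
  | cons x xs ih =>
    intro acc
    by_cases h : x = 0
    · simp [loopA3, h]
    · rw [loopA3, if_neg (by simp [h] : ¬ x = 0), ih]
      by_cases hall : xs.all (fun x => !(x == 0)) = true
      · simp [hall, h]; push_cast; ring
      · simp [hall, h]

-- unfolding B's port through zsFrom
lemma alt_char (arr : List Int) :
    isHollow_alt arr =
      match (zsFrom arr 0).head?, (zsFrom arr 0).getLast? with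
      | some a, some b =>
          if (3 : Int) ≤ ((zsFrom arr 0).length : Int) ∧ b - a + 1 = ((zsFrom arr 0).length : Int) ∧
              a = (arr.length : Int) - 1 - b
          then 1 else 0
      | _, _ => 0 := rfl

-- A's port through takeWhile/dropWhile decomposition
lemma A_char (arr : List Int) :
    isHollow arr =
      if ((arr.dropWhile (fun x => !(x == 0))).dropWhile (fun x => x == 0)).all (fun x => !(x == 0)) then
        (if 3 ≤ ((((arr.dropWhile (fun x => !(x == 0))).takeWhile (fun x => x == 0)).length : Int)) ∧
            ((arr.takeWhile (fun x => !(x == 0))).length : Int) =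
              ((((arr.dropWhile (fun x => !(x == 0))).dropWhile (fun x => x == 0)).length : Int))
         then 1 else 0)
      else 0 := by
  simp only [isHollow, loopA1_eq, loopA2_eq, loopA3_eq]
  split_ifs with h1 <;> simp_all

-- B's takeWhile/dropWhile facts, proved by induction to sidestep head-proof rewriting
lemma tw_dw_nil (l : List Int) :
    (l.dropWhile (fun x => !(x == 0))).takeWhile (fun x => x == 0) = [] →
    l.dropWhile (fun x => !(x == 0)) = [] := by
  induction l with
  | nil => simp
  | cons x xs ih =>
    rw [List.dropWhile_cons]
    by_cases h : x = 0
    · intro hc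
      rw [if_neg (by simp [h])] at hc ⊢
      rw [List.takeWhile_cons, if_pos (by simp [h])] at hc
      simp at hc
    · intro hc
      rw [if_pos (by simp [h])] at hc ⊢
      exact ih hc

lemma dw_head_ne (l : List Int) (r0 : Int) (R' : List Int)
    (h : l.dropWhile (fun x => x == 0) = r0 :: R') : r0 ≠ 0 := by
  induction l with
  | nil => simp at h
  | cons x xs ih =>
    rw [List.dropWhile_cons] at h
    by_cases hx : x = 0
    · exact ih (by rwa [if_pos (by simp [hx])] at h)
    · rw [if_neg (by simp [hx])] at h
      obtain ⟨rfl, -⟩ := List.cons.inj h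
      exact hx

lemma key (L M R : List Int)
    (hLne : ∀ x ∈ L, x ≠ 0) (hM0 : ∀ x ∈ M, x = 0)
    (hMnil : M = [] → R = []) (hRhead : ∀ r0 R', R = r0 :: R' → r0 ≠ 0) :
    (if R.all (fun x => !(x == 0)) then
       (if 3 ≤ (M.length : Int) ∧ (L.length : Int) = (R.length : Int) then 1 else 0)
     else (0 : Int)) =
      match (zsFrom (L ++ (M ++ R)) 0).head?, (zsFrom (L ++ (M ++ R)) 0).getLast? with
      | some a, some b =>
          if (3 : Int) ≤ ((zsFrom (L ++ (M ++ R)) 0).length : Int) ∧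
              b - a + 1 = ((zsFrom (L ++ (M ++ R)) 0).length : Int) ∧
              a = (((L ++ (M ++ R)).length : Int)) - 1 - b
          then 1 else 0
      | _, _ => 0 := by
  have hzs : zsFrom (L ++ (M ++ R)) 0 =
      zsFrom M ((L.length : Int)) ++ zsFrom R ((L.length : Int) + M.length) := by
    rw [zsFrom_append, zsFrom_append, zsFrom_all_ne L 0 hLne]
    simp [add_assoc]
  have htot : (((L ++ (M ++ R)).length : Int)) = L.length + (M.length + R.length) := by
    push_cast; simp
  by_cases hRz : R.all (fun x => !(x == 0))
  · -- no zero after the zero block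
    rw [if_pos hRz]
    have hzR : zsFrom R ((L.length : Int) + M.length) = [] :=
      zsFrom_all_ne _ _ (fun x hx => by simpa using List.all_eq_true.1 hRz x hx)
    by_cases hM : M = []
    · have hR := hMnil hM
      rw [hzs, hzR, hM, zsFrom_nil]
      simp only [List.nil_append, List.head?_nil]
      rw [if_neg (by simp [hM])]
    · obtain ⟨n, hn⟩ : ∃ n, M.length = n + 1 := by
        cases M with
        | nil => exact absurd rfl hM
        | cons a l => exact ⟨l.length, rfl⟩
      have hzM := zsFrom_all_zero M ((L.length : Int)) hM0
      rw [hzs, hzR, List.append_nil, hzM, hn]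
      have hhead : ((List.range (n + 1)).map (fun k : Nat => (L.length : Int) + (k : Int))).head? =
          some ((L.length : Int) + 0) := by
        rw [List.range_succ_eq_map]; simp
      have hlast : ((List.range (n + 1)).map (fun k : Nat => (L.length : Int) + (k : Int))).getLast? =
          some ((L.length : Int) + n) := by
        rw [List.range_succ, List.map_append]
        simp
      rw [hhead, hlast]
      simp only [List.length_map, List.length_range]
      have hiff : ((3 : Int) ≤ ((n + 1 : Nat) : Int) ∧
          ((L.length : Int) + n) - ((L.length : Int) + 0) + 1 = ((n + 1 : Nat) : Int) ∧
          (L.length : Int) + 0 = (((L ++ (M ++ R)).length : Int)) - 1 - ((L.length : Int) + n)) ↔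
          (3 ≤ (((n + 1 : Nat)) : Int) ∧ (L.length : Int) = (R.length : Int)) := by
        rw [htot, hn]; push_cast; omega
      by_cases hc : 3 ≤ (((n + 1 : Nat)) : Int) ∧ (L.length : Int) = (R.length : Int)
      · exact (if_pos hc).trans (if_pos (hiff.2 hc)).symm
      · exact (if_neg hc).trans (if_neg (fun h => hc (hiff.1 h))).symm
  · -- a zero strictly after the zero block: A returns 0 early, B sees a gap in the indices
    rw [if_neg hRz]
    obtain ⟨x0, hx0mem, hx00⟩ : ∃ x ∈ R, x = 0 := by
      by_contra hc
      push_neg at hc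
      exact hRz (List.all_eq_true.2 (fun x hx => by simpa using hc x hx))
    rcases hRc : R with _ | ⟨r0, R'⟩
    · rw [hRc] at hx0mem; simp at hx0mem
    · subst hRc
      have hr0 : r0 ≠ 0 := hRhead r0 R' rfl
      have hMne : M ≠ [] := by
        intro h
        simpa using hMnil h
      obtain ⟨n, hn⟩ : ∃ n, M.length = n + 1 := by
        cases M with
        | nil => exact absurd rfl hMne
        | cons a l => exact ⟨l.length, rfl⟩
      have hx0R' : x0 ∈ R' := by
        rcases List.mem_cons.1 hx0mem with rfl | h
        · exact absurd hx00 hr0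
        · exact h
      have hSne : zsFrom R' ((L.length : Int) + M.length + 1) ≠ [] :=
        zsFrom_ne_nil _ _ ⟨x0, hx0R', hx00⟩
      have hSdef : zsFrom (r0 :: R') ((L.length : Int) + M.length) =
          zsFrom R' ((L.length : Int) + M.length + 1) := by
        rw [zsFrom_cons]
        simp [hr0]
      rcases hSc : zsFrom R' ((L.length : Int) + M.length + 1) with _ | ⟨sh, St⟩
      · exact absurd hSc hSne
      · have hpair : (sh :: St).Pairwise (· < ·) := by
          rw [← hSc]; exact zsFrom_pairwise _ _
        have hchain := chain_head_len St sh hpair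
        have hshlb : (L.length : Int) + M.length + 1 ≤ sh := by
          have hmem : sh ∈ zsFrom R' ((L.length : Int) + M.length + 1) := by rw [hSc]; simp
          exact zsFrom_mem_lb _ _ sh hmem
        have hzM := zsFrom_all_zero M ((L.length : Int)) hM0
        rw [hzs, hSdef, hSc, hzM, hn]
        have hhead : (((List.range (n + 1)).map (fun k : Nat => (L.length : Int) + (k : Int))) ++
            (sh :: St)).head? = some ((L.length : Int) + 0) := by
          rw [List.head?_append, List.range_succ_eq_map]
          simp
        have hlast : (((List.range (n + 1)).map (fun k : Nat => (L.length : Int) + (k : Int))) ++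
            (sh :: St)).getLast? = some ((sh :: St).getLast (by simp)) := by
          rw [List.getLast?_append, List.getLast?_eq_getLast (l := sh :: St) (by simp)]
          simp
        rw [hhead, hlast]
        have hcond : ¬ ((3 : Int) ≤ ((((List.range (n + 1)).map
              (fun k : Nat => (L.length : Int) + (k : Int))) ++ (sh :: St)).length : Int) ∧
            ((sh :: St).getLast (by simp)) - ((L.length : Int) + 0) + 1 =
              ((((List.range (n + 1)).map (fun k : Nat => (L.length : Int) + (k : Int))) ++
                (sh :: St)).length : Int) ∧
            (L.length : Int) + 0 =
              (((L ++ (M ++ r0 :: R')).length : Int)) - 1 -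
                ((sh :: St).getLast (by simp))) := by
          rintro ⟨-, heq, -⟩
          simp only [List.length_append, List.length_map, List.length_range,
            List.length_cons] at heq
          rw [hn] at hshlb
          simp only [List.length_cons] at hchain
          push_cast at heq hshlb hchain
          omega
        exact (if_neg hcond).symm

lemma main_eq (arr : List Int) : isHollow arr = isHollow_alt arr := by
  rw [A_char, alt_char]
  have hsplit : arr.takeWhile (fun x => !(x == 0)) ++
      ((arr.dropWhile (fun x => !(x == 0))).takeWhile (fun x => x == 0) ++
       (arr.dropWhile (fun x => !(x == 0))).dropWhile (fun x => x == 0)) = arr := by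
    rw [List.takeWhile_append_dropWhile, List.takeWhile_append_dropWhile]
  conv_rhs => rw [← hsplit]
  exact key _ _ _
    (fun x hx => by simpa using List.mem_takeWhile_imp hx)
    (fun x hx => by simpa using List.mem_takeWhile_imp hx)
    (fun h => by rw [tw_dw_nil arr h]; simp)
    (fun r0 R' h => dw_head_ne _ r0 R' h)

-- ===== VERDICT (by name: the statement is the Claim_ definition above) =====
theorem isHollow_spec : Claim_equal_isHollow := by
  intro arr _
  unfold Spec_isHollow
  exact main_eq arr
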